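-- pv_equiv track=rewrite | github.com/studentUnk/Crypto | des.py | encontrarNumeroMatriz
-- ===== SOURCE A (Python) =====
-- def encontrarNumeroMatriz(matriz,numero):
--  pos = 0 # Posicion si encuentra numero
--  for fila in matriz:
--   for columna in fila:
--    if(numero == columna):
--     #return True
--     return pos
--    pos = pos + 1
--  #return False
--  return -1
-- ===== SOURCE B (Python) =====
-- def encontrarNumeroMatriz(matriz, numero):
--     # Stage 1: build a first-occurrence index of every value -> its flat position.
--     first = {}
--     pos = 0
--     for fila in matriz:
--         for x in fila:
--             if x not in first:
--                 first[x] = pos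
--             pos += 1
--     # Stage 2: one lookup.
--     return first.get(numero, -1)
-- ===== Notes on version B (the rewrite author's own statement) =====
-- stated objective: alternative
-- what changed: Replaces A's early-return scan comparing each element against the target with a two-stage algorithm: first build a dict mapping each value to its first flat position over the whole matrix, then answer with a single dict lookup (get with default -1).
import Mathlib
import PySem

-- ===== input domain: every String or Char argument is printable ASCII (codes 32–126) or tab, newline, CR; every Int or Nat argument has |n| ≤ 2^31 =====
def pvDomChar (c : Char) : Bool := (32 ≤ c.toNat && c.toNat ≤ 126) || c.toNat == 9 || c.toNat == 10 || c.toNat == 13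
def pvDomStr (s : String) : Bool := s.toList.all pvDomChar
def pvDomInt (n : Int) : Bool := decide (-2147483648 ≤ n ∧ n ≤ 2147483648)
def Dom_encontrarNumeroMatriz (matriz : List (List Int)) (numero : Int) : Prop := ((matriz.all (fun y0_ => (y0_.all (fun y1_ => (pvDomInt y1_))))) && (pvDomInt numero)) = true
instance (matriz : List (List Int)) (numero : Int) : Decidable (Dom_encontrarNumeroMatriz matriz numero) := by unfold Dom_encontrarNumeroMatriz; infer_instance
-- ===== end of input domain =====

-- B replaces A's target-comparing early-return scan by a two-stage algorithm:
-- build a first-occurrence dict (value -> flat position) over the whole matrix, then one lookup (alternative, not faster).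

-- ===== PORT A =====
-- inner loop over a row: returns the found position, or the updated counter
def pvScanFila (numero : Int) : List Int → Int → Option Int × Int
  | [], pos => (none, pos)
  | columna :: resto, pos =>
    if numero == columna then (some pos, pos) else pvScanFila numero resto (pos + 1)

-- outer loop over the rows, threading the counter
def pvScanMatriz (numero : Int) : List (List Int) → Int → Int
  | [], _ => -1
  | fila :: resto, pos =>
    match pvScanFila numero fila pos with
    | (some p, _) => p
    | (none, pos') => pvScanMatriz numero resto pos'

def encontrarNumeroMatriz (matriz : List (List Int)) (numero : Int) : Int :=
  pvScanMatriz numero matriz 0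

-- ===== PORT B =====
-- one step of the index-building loop: 'if x not in first: first[x] = pos; pos += 1'
def pvStep (st : PySem.Dict Int Int × Int) (x : Int) : PySem.Dict Int Int × Int :=
  (if st.1.contains x then st.1 else st.1.insert x st.2, st.2 + 1)

def encontrarNumeroMatriz_alt (matriz : List (List Int)) (numero : Int) : Int :=
  -- Stage 1: first-occurrence index over the whole matrix
  let st := matriz.foldl (fun st fila => fila.foldl pvStep st) (PySem.Dict.empty, 0)
  -- Stage 2: first.get(numero, -1)
  st.1.getD numero (-1)

-- ===== PRECONDITION & SPEC =====
def Spec_encontrarNumeroMatriz (matriz : List (List Int)) (numero : Int) (out : Int) : Prop := out = encontrarNumeroMatriz_alt matriz numero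
instance (matriz : List (List Int)) (numero : Int) (out : Int) : Decidable (Spec_encontrarNumeroMatriz matriz numero out) := by unfold Spec_encontrarNumeroMatriz; infer_instance

-- ===== CLAIM (what is proved, stated in full; the proofs are below) =====
def Claim_equal_encontrarNumeroMatriz : Prop := ∀ (matriz : List (List Int)) (numero : Int), Dom_encontrarNumeroMatriz matriz numero → Spec_encontrarNumeroMatriz matriz numero (encontrarNumeroMatriz matriz numero)

-- ===== LEMMAS AND PROOFS =====

-- A's scan splits over an append of the element stream
lemma pvScanFila_append (numero : Int) (a b : List Int) (pos : Int) :
    pvScanFila numero (a ++ b) pos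
      = match pvScanFila numero a pos with
        | (some p, q) => (some p, q)
        | (none, q) => pvScanFila numero b q := by
  induction a generalizing pos with
  | nil => simp [pvScanFila]
  | cons c r ih =>
    by_cases h : numero = c
    · simp [pvScanFila, h]
    · simp [pvScanFila, h, ih]

-- A's nested loops are the flat scan of the flattened matrix
lemma pvScanMatriz_eq_flat (numero : Int) (matriz : List (List Int)) (pos : Int) :
    pvScanMatriz numero matriz pos
      = match pvScanFila numero matriz.flatten pos with
        | (some p, _) => p
        | (none, _) => -1 := by
  induction matriz generalizing pos with
  | nil => simp [pvScanMatriz, pvScanFila]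
  | cons fila resto ih =>
    rw [pvScanMatriz, List.flatten_cons, pvScanFila_append]
    rcases h : pvScanFila numero fila pos with ⟨o, q⟩
    cases o <;> simp [ih]

-- B's index-building fold, run over any element stream xs from state (d, pos):
-- looking up v afterwards gives d's binding if present, else the first position of v in xs
lemma pvBuild_get? (v : Int) (xs : List Int) (d : PySem.Dict Int Int) (pos : Int) :
    (xs.foldl pvStep (d, pos)).1.get? v
      = match d.get? v with
        | some w => some w
        | none => (pvScanFila v xs pos).1 := by
  induction xs generalizing d pos with
  | nil =>
    rcases h : d.get? v with _ | w <;> simp [pvScanFila, h]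
  | cons x r ih =>
    have hstep : pvStep (d, pos) x
        = (if d.contains x then d else d.insert x pos, pos + 1) := rfl
    rw [List.foldl_cons, hstep, ih]
    by_cases hv : v = x
    · subst hv
      rcases hg : d.get? v with _ | w
      · have hc : d.contains v = false := by
          rw [PySem.Dict.contains_eq_isSome_get?, hg]; rfl
        simp [hc, PySem.Dict.get?_insert_self, pvScanFila]
      · have hc : d.contains v = true := by
          rw [PySem.Dict.contains_eq_isSome_get?, hg]; rfl
        simp [hc, hg]
    · have hget : (if d.contains x then d else d.insert x pos).get? v = d.get? v := by
        split
        · rfl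
        · exact PySem.Dict.get?_insert_of_ne d pos hv
      rw [hget]
      have : pvScanFila v (x :: r) pos = pvScanFila v r (pos + 1) := by
        simp [pvScanFila, fun h => hv h]
      rw [this]

-- nested per-row folds are the fold over the flattened matrix
lemma pvBuild_flatten (matriz : List (List Int)) (st : PySem.Dict Int Int × Int) :
    matriz.foldl (fun st fila => fila.foldl pvStep st) st
      = matriz.flatten.foldl pvStep st := by
  induction matriz generalizing st with
  | nil => rfl
  | cons fila resto ih => simp [List.flatten_cons, List.foldl_append, ih]

-- ===== VERDICT (by name: the statement is the Claim_ definition above) =====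
theorem encontrarNumeroMatriz_spec : Claim_equal_encontrarNumeroMatriz := by
  intro matriz numero _
  unfold Spec_encontrarNumeroMatriz encontrarNumeroMatriz encontrarNumeroMatriz_alt
  rw [pvBuild_flatten, PySem.Dict.getD_eq_get?_getD, pvBuild_get?,
      PySem.Dict.get?_empty, pvScanMatriz_eq_flat]
  rcases h : pvScanFila numero matriz.flatten 0 with ⟨o, q⟩
  cases o <;> simp
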